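-- pv_equiv track=rewrite | github.com/jingwangian/tutorial | python/hanker/DeterminingDNAHealth.py | get_dna_value
-- ===== SOURCE A (Python) =====
-- def find_total_substring_v2(s1, s2):
--     '''
--     Find the total number of s2 in s1.
--     Example: s1='aaaab'  s2='aa', number = 3
--     Explain: 1st time found is s1[0],s1[1]
--              2nd time found is s1[1],s1[2]
--              3rd time found is s1[2],s1[3]
--     '''
--
--     s1_len = len(s1)
--
--     total_value = 0
--     pos = 0
--     end_pos = s1_len
--
--     while (pos < end_pos):
--         try:
--             ret = s1[pos:].find(s2)
--         except IndexError:
--             break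
--
--         if ret != -1:
--             total_value += 1
--             pos = pos + ret + 1
--         else:
--             break
--
--     return total_value
--
-- def get_dna_value(gen_health_list, d):
--     total_value = 0
--     d1 = dict()
--     for gen in gen_health_list:
--         # value = 0
--         # number = find_total_substring_v2(d, gen[0])
--         # if d1.setdefault(gen[0], int(-1)) != -1:
--         #     number = d1[gen[0]]
--         # else:
--         #     number = find_total_substring_v2(d, gen[0])
--         #     d1[gen[0]] = number
--
--         try:
--             number = d1[gen[0]]
--         except KeyError:
--             number = find_total_substring_v2(d, gen[0])
--             d1[gen[0]] = number
--
--         total_value += number * gen[1]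
--
--     return total_value
-- ===== SOURCE B (Python) =====
-- def get_dna_value(gen_health_list, d):
--     n = len(d)
--     return sum(h * sum(d.startswith(g, i) for i in range(n))
--                for g, h in gen_health_list)
-- ===== Notes on version B (the rewrite author's own statement) =====
-- stated objective: simpler
-- what changed: Replaces the memo-dict plus find-and-jump while loop (repeatedly slicing d and calling str.find) by a direct double sum: for each gene, count the start positions i with d.startswith(gene, i) and weight by its health.
import Mathlib
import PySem

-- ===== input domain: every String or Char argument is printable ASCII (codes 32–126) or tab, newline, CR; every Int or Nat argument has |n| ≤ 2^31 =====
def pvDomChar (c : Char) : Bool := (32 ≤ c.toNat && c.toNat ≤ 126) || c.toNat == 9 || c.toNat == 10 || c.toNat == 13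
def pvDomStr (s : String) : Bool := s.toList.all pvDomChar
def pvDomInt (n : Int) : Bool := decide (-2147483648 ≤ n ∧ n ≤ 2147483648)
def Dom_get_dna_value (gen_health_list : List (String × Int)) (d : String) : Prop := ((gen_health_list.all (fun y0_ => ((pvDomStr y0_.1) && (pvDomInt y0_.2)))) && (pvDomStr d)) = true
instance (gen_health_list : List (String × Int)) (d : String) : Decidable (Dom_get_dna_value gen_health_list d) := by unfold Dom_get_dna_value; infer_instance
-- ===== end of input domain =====

-- B replaces A's memo dict + find-and-jump while loop by a direct double sum over genes and
-- start positions (objective: simpler); return values proved equal on all inputs.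

-- ===== PORT A =====
-- the while loop of find_total_substring_v2: s1[pos:] with 0 ≤ pos is List.drop pos; the
-- try/except IndexError never fires (slicing never raises), so it is not a branch here.
-- ret ≠ -1 implies 0 ≤ ret (find ≥ -1), so 'pos + ret + 1' is the Nat 'pos + ret.toNat + 1'.
def ftLoop (s1 s2 : List Char) (end_pos pos : Nat) (total : Int) : Int :=
  if h : pos < end_pos then
    let ret := PySem.Chars.find (s1.drop pos) s2
    if ret ≠ -1 then
      ftLoop s1 s2 end_pos (pos + ret.toNat + 1) (total + 1)
    else total
  else total
termination_by end_pos - pos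
decreasing_by omega

def find_total_substring_v2 (s1 s2 : String) : Int :=
  let s1_len := s1.toList.length
  ftLoop s1.toList s2.toList s1_len 0 0

def get_dna_value (gen_health_list : List (String × Int)) (d : String) : Int :=
  (gen_health_list.foldl
    (fun (st : Int × PySem.Dict String Int) gen =>
      -- try: number = d1[gen[0]]  except KeyError: compute and store
      match PySem.Dict.get? st.2 gen.1 with
      | some number => (st.1 + number * gen.2, st.2)
      | none =>
          let number := find_total_substring_v2 d gen.1
          (st.1 + number * gen.2, PySem.Dict.insert st.2 gen.1 number))
    ((0 : Int), (PySem.Dict.empty : PySem.Dict String Int))).1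

-- ===== PORT B =====
-- Source B: sum(h * sum(d.startswith(g, i) for i in range(n)) for g, h in gen_health_list).
-- d.startswith(g, i) with 0 ≤ i ≤ len(d) is exactly (d[i:]).startswith(g): drop + startswith.
def get_dna_value_alt (gen_health_list : List (String × Int)) (d : String) : Int :=
  let n := d.toList.length
  (gen_health_list.map (fun gh =>
    gh.2 * ((List.range n).map (fun i =>
      if PySem.Chars.startswith (d.toList.drop i) gh.1.toList then (1 : Int) else 0)).sum)).sum

-- ===== PRECONDITION & SPEC =====
def Spec_get_dna_value (gen_health_list : List (String × Int)) (d : String) (out : Int) : Prop := out = get_dna_value_alt gen_health_list d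
instance (gen_health_list : List (String × Int)) (d : String) (out : Int) : Decidable (Spec_get_dna_value gen_health_list d out) := by unfold Spec_get_dna_value; infer_instance

-- ===== CLAIM (what is proved, stated in full; the proofs are below) =====
def Claim_equal_get_dna_value : Prop := ∀ (gen_health_list : List (String × Int)) (d : String), Dom_get_dna_value gen_health_list d → Spec_get_dna_value gen_health_list d (get_dna_value gen_health_list d)

-- ===== LEMMAS AND PROOFS =====

-- number of positions i with pos ≤ i < s1.length at which s2 occurs in s1
def pvMatchCount (s1 s2 : List Char) (pos : Nat) : Int :=
  if pos < s1.length then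
    (if s2 <+: s1.drop pos then 1 else 0) + pvMatchCount s1 s2 (pos + 1)
  else 0
termination_by s1.length - pos

lemma pvMatchCount_of_ge (s1 s2 : List Char) (pos : Nat) (h : s1.length ≤ pos) :
    pvMatchCount s1 s2 pos = 0 := by
  rw [pvMatchCount]; simp [Nat.not_lt.mpr h]

lemma pvMatchCount_zero_of_no_match (s1 s2 : List Char) :
    ∀ (n pos : Nat), s1.length - pos ≤ n →
    (∀ i, pos ≤ i → ¬ s2 <+: s1.drop i) → pvMatchCount s1 s2 pos = 0 := by
  intro n
  induction n with
  | zero => intro pos hn _; exact pvMatchCount_of_ge s1 s2 pos (by omega)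
  | succ n ih =>
    intro pos hn hno
    by_cases hpos : pos < s1.length
    · rw [pvMatchCount]
      simp only [hpos, if_true]
      rw [ih (pos + 1) (by omega) (fun i hi => hno i (by omega))]
      simp [hno pos le_rfl]
    · exact pvMatchCount_of_ge s1 s2 pos (by omega)

lemma pvMatchCount_skip (s1 s2 : List Char) :
    ∀ (n pos q : Nat), q - pos ≤ n → pos ≤ q →
    (∀ i, pos ≤ i → i < q → ¬ s2 <+: s1.drop i) →
    pvMatchCount s1 s2 pos = pvMatchCount s1 s2 q := by
  intro n
  induction n with
  | zero =>
    intro pos q hn hle _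
    have h : pos = q := by omega
    subst h
    rfl
  | succ n ih =>
    intro pos q hn hle hno
    by_cases heq : pos = q
    · rw [heq]
    · have hlt : pos < q := by omega
      have h1 : pvMatchCount s1 s2 pos = pvMatchCount s1 s2 (pos + 1) := by
        by_cases hpos : pos < s1.length
        · rw [pvMatchCount]
          simp [hpos, hno pos le_rfl hlt]
        · rw [pvMatchCount_of_ge s1 s2 pos (by omega),
              pvMatchCount_of_ge s1 s2 (pos + 1) (by omega)]
      rw [h1]
      exact ih (pos + 1) q (by omega) (by omega) (fun i hi hi' => hno i (by omega) hi')

lemma pvMatchCount_match (s1 s2 : List Char) (pos : Nat) (hpos : pos < s1.length)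
    (hm : s2 <+: s1.drop pos) :
    pvMatchCount s1 s2 pos = 1 + pvMatchCount s1 s2 (pos + 1) := by
  rw [pvMatchCount]; simp [hpos, hm]

-- prefix at a later position is still an infix of the earlier suffix
lemma prefix_drop_infix (s1 s2 : List Char) (pos i : Nat) (hle : pos ≤ i)
    (h : s2 <+: s1.drop i) : s2 <:+: s1.drop pos := by
  rw [← PySem.Chars.isIn_iff_infix, ← PySem.Chars.exists_prefix_drop_iff_isIn]
  refine ⟨i - pos, ?_⟩
  rwa [List.drop_drop, Nat.add_sub_cancel' hle]

-- A's find-and-jump loop counts exactly the match positions ≥ pos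
lemma ftLoop_eq_matchCount (s1 s2 : List Char) :
    ∀ (n pos : Nat) (total : Int), s1.length - pos ≤ n →
    ftLoop s1 s2 s1.length pos total = total + pvMatchCount s1 s2 pos := by
  intro n
  induction n with
  | zero =>
    intro pos total hn
    rw [ftLoop, pvMatchCount]
    simp [Nat.not_lt.mpr (show s1.length ≤ pos by omega)]
  | succ n ih =>
    intro pos total hn
    by_cases hpos : pos < s1.length
    · rw [ftLoop]
      simp only [hpos, dif_pos]
      set ret := PySem.Chars.find (s1.drop pos) s2 with hret
      by_cases hne : ret ≠ -1
      · have hge : 0 ≤ ret := by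
          have := PySem.Chars.neg_one_le_find (s1.drop pos) s2
          rw [← hret] at this; omega
        obtain ⟨hpre, hmin⟩ := PySem.Chars.find_spec (s := s1.drop pos) (sub := s2) hge
        rw [← hret] at hpre hmin
        have hpre' : s2 <+: s1.drop (pos + ret.toNat) := by
          rw [List.drop_drop] at hpre
          exact hpre
        have hq : pos + ret.toNat < s1.length := by
          by_cases hs2 : s2 = []
          · have : ret = 0 := by rw [hret, hs2]; exact PySem.Chars.find_nil _
            simp [this]; omega
          · have h1 : s2.length ≤ (s1.drop (pos + ret.toNat)).length := hpre'.length_le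
            rw [List.length_drop] at h1
            have : 0 < s2.length := List.length_pos_of_ne_nil hs2
            omega
        have hnomid : ∀ i, pos ≤ i → i < pos + ret.toNat → ¬ s2 <+: s1.drop i := by
          intro i hi hi' hcon
          have := hmin (i - pos) (by omega)
          rw [List.drop_drop, Nat.add_sub_cancel' hi] at this
          exact this hcon
        rw [if_pos hne]
        rw [ih (pos + ret.toNat + 1) (total + 1) (by omega)]
        rw [pvMatchCount_skip s1 s2 (pos + ret.toNat) pos (pos + ret.toNat) (by omega) (by omega) hnomid]
        rw [pvMatchCount_match s1 s2 (pos + ret.toNat) hq hpre']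
        ring
      · rw [if_neg hne]
        have hne' : PySem.Chars.find (s1.drop pos) s2 = -1 := by
          rw [← hret]; exact not_not.mp hne
        have hno : ∀ i, pos ≤ i → ¬ s2 <+: s1.drop i := by
          intro i hi hcon
          exact ((PySem.Chars.find_eq_neg_one_iff _ _).mp hne') (prefix_drop_infix s1 s2 pos i hi hcon)
        rw [pvMatchCount_zero_of_no_match s1 s2 (s1.length) pos (by omega) hno]
        ring
    · rw [ftLoop, pvMatchCount]
      simp [hpos]

-- B's 0/1 position sum is the same count
lemma range'_sum_eq_matchCount (s1 s2 : List Char) :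
    ∀ (cnt pos : Nat), pos + cnt = s1.length →
    ((List.range' pos cnt).map (fun i =>
      if s2 <+: s1.drop i then (1 : Int) else 0)).sum = pvMatchCount s1 s2 pos := by
  intro cnt
  induction cnt with
  | zero =>
    intro pos h
    rw [pvMatchCount_of_ge s1 s2 pos (by omega)]
    simp
  | succ n ih =>
    intro pos h
    rw [List.range'_succ, pvMatchCount]
    simp only [List.map_cons, List.sum_cons, if_pos (show pos < s1.length by omega)]
    rw [ih (pos + 1) (by omega)]

lemma per_gene (d g : String) :
    find_total_substring_v2 d g =
    ((List.range d.toList.length).map (fun i =>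
      if PySem.Chars.startswith (d.toList.drop i) g.toList then (1 : Int) else 0)).sum := by
  have h1 : ∀ i, (if PySem.Chars.startswith (d.toList.drop i) g.toList then (1 : Int) else 0)
      = (if g.toList <+: d.toList.drop i then (1 : Int) else 0) := by
    intro i; simp [PySem.Chars.startswith_iff]
  rw [List.map_congr_left (fun i _ => h1 i)]
  rw [List.range_eq_range']
  rw [range'_sum_eq_matchCount d.toList g.toList d.toList.length 0 (by omega)]
  show ftLoop d.toList g.toList d.toList.length 0 0 = _
  rw [ftLoop_eq_matchCount d.toList g.toList d.toList.length 0 0 (by omega)]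
  ring

-- A's memoising fold: as long as every stored value is the recomputed value, the total is the plain sum
lemma fold_memo (d : String) :
    ∀ (l : List (String × Int)) (total : Int) (d1 : PySem.Dict String Int),
    (∀ k v, PySem.Dict.get? d1 k = some v → v = find_total_substring_v2 d k) →
    (l.foldl
      (fun (st : Int × PySem.Dict String Int) gen =>
        match PySem.Dict.get? st.2 gen.1 with
        | some number => (st.1 + number * gen.2, st.2)
        | none =>
            let number := find_total_substring_v2 d gen.1
            (st.1 + number * gen.2, PySem.Dict.insert st.2 gen.1 number))
      (total, d1)).1
    = total + (l.map (fun gh => find_total_substring_v2 d gh.1 * gh.2)).sum := by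
  intro l
  induction l with
  | nil => intro total d1 _; simp
  | cons gh rest ih =>
    intro total d1 hinv
    simp only [List.foldl_cons, List.map_cons, List.sum_cons]
    cases hget : PySem.Dict.get? d1 gh.1 with
    | some v =>
      rw [ih (total + v * gh.2) d1 hinv, hinv gh.1 v hget]
      ring
    | none =>
      rw [ih (total + find_total_substring_v2 d gh.1 * gh.2) _ ?_]
      · ring
      · intro k v hk
        rw [PySem.Dict.get?_insert] at hk
        by_cases hkk : k = gh.1
        · rw [if_pos hkk] at hk
          cases hk; rw [hkk]
        · rw [if_neg hkk] at hk
          exact hinv k v hk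

-- ===== VERDICT (by name: the statement is the Claim_ definition above) =====
theorem get_dna_value_spec : Claim_equal_get_dna_value := by
  intro gen_health_list d _
  unfold Spec_get_dna_value get_dna_value get_dna_value_alt
  rw [fold_memo d gen_health_list 0 PySem.Dict.empty (by intro k v hk; simp [PySem.Dict.get?_empty] at hk)]
  rw [List.map_congr_left (fun gh _ => by rw [per_gene d gh.1, Int.mul_comm])]
  ring
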